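-- pv_equiv track=rewrite | github.com/mmmbvl/aoc | day_18/script.py | define_grid_size
-- ===== SOURCE A (Python) =====
-- def define_grid_size(instructions):
--     size = [0, 0, 0, 0]
--     for inst in instructions:
--         if inst[0] == "U":
--             size[0] += inst[1]
--         if inst[0] == "D":
--             size[2] += inst[1]
--         if inst[0] == "L":
--             size[1] += inst[1]
--         if inst[0] == "R":
--             size[3] += inst[1]
--     return size
-- ===== SOURCE B (Python) =====
-- def define_grid_size(instructions):
--     return [sum(n for d, n in instructions if d == key)
--             for key in ("U", "L", "D", "R")]
-- ===== Notes on version B (the rewrite author's own statement) =====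
-- stated objective: simpler
-- what changed: Replaces the mutable 4-slot accumulator with a dispatching if-chain by a list comprehension of four independent filtered sums, one per direction in the same U,L,D,R slot order.
import Mathlib
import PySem

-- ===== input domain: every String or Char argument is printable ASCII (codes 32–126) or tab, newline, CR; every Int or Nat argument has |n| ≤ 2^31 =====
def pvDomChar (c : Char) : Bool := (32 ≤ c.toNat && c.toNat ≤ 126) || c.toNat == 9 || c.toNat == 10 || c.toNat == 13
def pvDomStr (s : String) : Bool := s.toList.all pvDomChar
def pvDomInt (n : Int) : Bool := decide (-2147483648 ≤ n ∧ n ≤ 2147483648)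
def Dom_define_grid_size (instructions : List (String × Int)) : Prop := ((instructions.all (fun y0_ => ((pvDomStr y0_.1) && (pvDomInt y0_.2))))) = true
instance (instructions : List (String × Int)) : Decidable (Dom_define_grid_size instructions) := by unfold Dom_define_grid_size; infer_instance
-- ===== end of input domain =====

-- B replaces A's single dispatching pass over a mutable 4-slot list with four
-- independent filtered sums (objective: simpler).
-- ===== PORT A =====
-- loop body of A (one instruction applied to the mutable 4-slot list), named for the proof
def pvStepA (size : List Int) (inst : String × Int) : List Int :=
  let size := if inst.1 == "U" then size.set 0 (size.getD 0 0 + inst.2) else size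
  let size := if inst.1 == "D" then size.set 2 (size.getD 2 0 + inst.2) else size
  let size := if inst.1 == "L" then size.set 1 (size.getD 1 0 + inst.2) else size
  let size := if inst.1 == "R" then size.set 3 (size.getD 3 0 + inst.2) else size
  size

def define_grid_size (instructions : List (String × Int)) : List Int :=
  instructions.foldl pvStepA [0, 0, 0, 0]

-- ===== PORT B =====
def pvDirSum (instructions : List (String × Int)) (key : String) : Int :=
  ((instructions.filter (fun p => p.1 == key)).map (fun p => p.2)).sum

def define_grid_size_alt (instructions : List (String × Int)) : List Int :=
  ["U", "L", "D", "R"].map (pvDirSum instructions)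

-- ===== PRECONDITION & SPEC =====
def Spec_define_grid_size (instructions : List (String × Int)) (out : List Int) : Prop := out = define_grid_size_alt instructions
instance (instructions : List (String × Int)) (out : List Int) : Decidable (Spec_define_grid_size instructions out) := by unfold Spec_define_grid_size; infer_instance

-- ===== CLAIM (what is proved, stated in full; the proofs are below) =====
def Claim_equal_define_grid_size : Prop := ∀ (instructions : List (String × Int)), Dom_define_grid_size instructions → Spec_define_grid_size instructions (define_grid_size instructions)

-- ===== LEMMAS AND PROOFS =====

-- ===== VERDICT (by name: the statement is the Claim_ definition above) =====
theorem pv_fold_inv (xs : List (String × Int)) (a b c d : Int) :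
    xs.foldl pvStepA [a, b, c, d]
    = [a + pvDirSum xs "U", b + pvDirSum xs "L", c + pvDirSum xs "D", d + pvDirSum xs "R"] := by
  induction xs generalizing a b c d with
  | nil => simp [pvDirSum]
  | cons hd tl ih =>
    obtain ⟨k, n⟩ := hd
    rw [List.foldl_cons]
    by_cases hU : k = "U"
    · rw [show pvStepA [a, b, c, d] (k, n) = [a + n, b, c, d] by simp [pvStepA, hU], ih]
      simp [pvDirSum, hU, add_assoc]
    · by_cases hD : k = "D"
      · rw [show pvStepA [a, b, c, d] (k, n) = [a, b, c + n, d] by simp [pvStepA, hD], ih]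
        simp [pvDirSum, hD, add_assoc]
      · by_cases hL : k = "L"
        · rw [show pvStepA [a, b, c, d] (k, n) = [a, b + n, c, d] by
            simp [pvStepA, hL], ih]
          simp [pvDirSum, hL, add_assoc]
        · by_cases hR : k = "R"
          · rw [show pvStepA [a, b, c, d] (k, n) = [a, b, c, d + n] by
              simp [pvStepA, hR], ih]
            simp [pvDirSum, hR, add_assoc]
          · rw [show pvStepA [a, b, c, d] (k, n) = [a, b, c, d] by
              simp [pvStepA, hU, hD, hL, hR], ih]
            simp [pvDirSum, hU, hD, hL, hR]

theorem define_grid_size_spec : Claim_equal_define_grid_size := by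
  intro xs _
  unfold Spec_define_grid_size define_grid_size define_grid_size_alt
  simpa using pv_fold_inv xs 0 0 0 0
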